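-- pv_equiv track=rewrite | github.com/bc36/leetcode | lc_Python/lc2100_2199.py | maximumGood
-- ===== SOURCE A (Python) =====
-- import bisect, collections, functools, math, itertools, heapq
-- from typing import List, Optional
--
-- def maximumGood(statements: List[List[int]]) -> int:
--     def check(st):
--         st = set(st)
--         for m in st:
--             for i, s in enumerate(statements[m]):
--                 if (s == 0 and i in st) or (s == 1 and i not in st):
--                     return False
--         return True
--
--     n = len(statements)
--     nums = list(range(n))
--     for i in range(n + 1, 0, -1):
--         for comb in itertools.combinations(nums, i):
--             if check(comb):
--                 return i
--     return 0
-- ===== SOURCE B (Python) =====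
-- def maximumGood(statements):
--     # Bitmask re-implementation: each person's claims are packed once into two
--     # bitmasks (who they call good / bad); every candidate set is a single
--     # integer mask checked with O(n) bitwise operations.
--     n = len(statements)
--     good, bad = [], []
--     for row in statements:
--         g = b = 0
--         for j, s in enumerate(row):
--             if s == 1:
--                 g |= 1 << j
--             elif s == 0:
--                 b |= 1 << j
--         good.append(g)
--         bad.append(b)
--     best = 0
--     for mask in range(1 << n):
--         req = forb = cnt = 0
--         for i in range(n):
--             if (mask >> i) & 1:
--                 req |= good[i]
--                 forb |= bad[i]
--                 cnt += 1
--         if req & mask == req and forb & mask == 0 and cnt > best: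
--             best = cnt
--     return best
-- ===== Notes on version B (the rewrite author's own statement) =====
-- stated objective: alternative
-- what changed: B replaces A's per-size itertools.combinations sweep over index tuples with set-based rescanning by a bitmask algorithm: each person's say-good/say-bad claims are packed once into two integer bitmasks, candidate sets are integers 0..2^n-1, and consistency of a mask is decided by OR-accumulating the members' masks and two bitwise subset/disjointness tests.
import Mathlib
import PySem

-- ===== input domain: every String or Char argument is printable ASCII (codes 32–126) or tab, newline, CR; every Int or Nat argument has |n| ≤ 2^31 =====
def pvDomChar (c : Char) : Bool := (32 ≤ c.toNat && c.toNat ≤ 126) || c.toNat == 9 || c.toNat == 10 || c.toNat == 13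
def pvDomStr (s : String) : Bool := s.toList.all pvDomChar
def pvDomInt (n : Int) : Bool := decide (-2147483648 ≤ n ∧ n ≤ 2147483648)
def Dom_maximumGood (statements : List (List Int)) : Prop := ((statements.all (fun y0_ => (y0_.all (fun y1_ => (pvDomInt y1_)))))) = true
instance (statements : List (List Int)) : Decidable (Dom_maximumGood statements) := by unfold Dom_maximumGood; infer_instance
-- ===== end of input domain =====

-- B is an alternative exact re-implementation: each person's say-good/say-bad claims
-- are packed once into two integer bitmasks, candidate sets are the integers
-- 0..2^n-1, and a candidate mask is checked by OR-accumulating its members' masks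
-- and two bitwise subset/disjointness tests — instead of A's per-size
-- itertools.combinations sweep over index tuples with set-based rescanning.

-- ===== PORT A =====

-- itertools.combinations(l, k) (lexicographic order of positions)
def combinationsA : List Int → Nat → List (List Int)
  | _, 0 => [[]]
  | [], _ + 1 => []
  | x :: xs, k + 1 => (combinationsA xs k).map (fun c => x :: c) ++ combinationsA xs (k + 1)

-- the inner 'check' closure; 'statements[m]' is always in range when called from A
-- (m comes from a combination of range(n)), so the .getD [] default is never used there.
def checkA (statements : List (List Int)) (st : List Int) : Bool :=
  let s : PySem.Set Int := PySem.Set.ofList st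
  s.all (fun m =>
    (PySem.List.enumerate ((PySem.List.pyGet? statements m).getD [])).all (fun iv =>
      !((iv.2 == 0 && PySem.Set.contains s iv.1) || (iv.2 == 1 && !PySem.Set.contains s iv.1))))

-- 'for i in range(n+1, 0, -1): for comb in combinations(nums, i): if check(comb): return i'
def goA (statements : List (List Int)) (nums : List Int) : List Int → Int
  | [] => 0
  | i :: rest =>
    if (combinationsA nums i.toNat).any (fun c => checkA statements c) then i
    else goA statements nums rest

def maximumGood (statements : List (List Int)) : Int :=
  let n : Int := (statements.length : Int)
  let nums := PySem.List.pyRange 0 n 1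
  goA statements nums (PySem.List.pyRange (n + 1) 0 (-1))

-- ===== PORT B =====

-- body of B's inner packing loop 'for j, s in enumerate(row): if s == 1: g |= 1 << j elif s == 0: b |= 1 << j'
-- (enumerate indices are ≥ 0, so .toNat is exact)
def packStep (p : Nat × Nat) (iv : Int × Int) : Nat × Nat :=
  if iv.2 == 1 then (p.1 ||| (1 <<< iv.1.toNat), p.2)
  else if iv.2 == 0 then (p.1, p.2 ||| (1 <<< iv.1.toNat))
  else p

-- body of B's loop 'for i in range(n): if (mask >> i) & 1: req |= good[i]; forb |= bad[i]; cnt += 1'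
-- (i < n = len(good) = len(bad) always, so the .getD 0 default is never used)
def innerStep (mask : Nat) (good bad : List Nat) (s : Nat × Nat × Nat) (i : Nat) : Nat × Nat × Nat :=
  if (mask >>> i) &&& 1 == 1 then
    (s.1 ||| good.getD i 0, s.2.1 ||| bad.getD i 0, s.2.2 + 1)
  else s

-- body of B's outer loop over masks
def maskBody (good bad : List Nat) (n : Nat) (best : Int) (mask : Nat) : Int :=
  let t := (List.range n).foldl (innerStep mask good bad) (0, 0, 0)
  if t.1 &&& mask == t.1 && t.2.1 &&& mask == 0 && (t.2.2 : Int) > best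
  then (t.2.2 : Int) else best

def maximumGood_alt (statements : List (List Int)) : Int :=
  let n := statements.length
  let gb := statements.foldl
    (fun (acc : List Nat × List Nat) row =>
      let m := (PySem.List.enumerate row).foldl packStep (0, 0)
      (acc.1 ++ [m.1], acc.2 ++ [m.2])) ([], [])
  (List.range (1 <<< n)).foldl (maskBody gb.1 gb.2 n) 0

-- ===== PRECONDITION & SPEC =====
def Spec_maximumGood (statements : List (List Int)) (out : Int) : Prop := out = maximumGood_alt statements
instance (statements : List (List Int)) (out : Int) : Decidable (Spec_maximumGood statements out) := by unfold Spec_maximumGood; infer_instance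

-- ===== CLAIM (what is proved, stated in full; the proofs are below) =====
def Claim_equal_maximumGood : Prop := ∀ (statements : List (List Int)), Dom_maximumGood statements → Spec_maximumGood statements (maximumGood statements)

-- ===== LEMMAS AND PROOFS =====

-- ---- A side (combinations, descending scan) ----

-- the canonical index list [0, 1, ..., n-1] as Ints
def rlist (n : Nat) : List Int := (List.range n).map (fun (k : Nat) => (k : Int))

-- combinationsA l k enumerates exactly the length-k sublists of l
theorem mem_combinationsA (l : List Int) : ∀ (k : Nat) (c : List Int),
    c ∈ combinationsA l k ↔ c.Sublist l ∧ c.length = k := by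
  induction l with
  | nil =>
    intro k c
    cases k with
    | zero =>
      simp only [combinationsA, List.mem_singleton, List.sublist_nil]
      constructor
      · rintro rfl; exact ⟨rfl, rfl⟩
      · rintro ⟨rfl, -⟩; rfl
    | succ k =>
      simp only [combinationsA, List.not_mem_nil, false_iff, not_and, List.sublist_nil]
      rintro rfl; simp
  | cons x xs ih =>
    intro k c
    cases k with
    | zero =>
      simp only [combinationsA, List.mem_singleton]
      constructor
      · rintro rfl; exact ⟨List.nil_sublist _, rfl⟩
      · rintro ⟨-, hl⟩; exact List.length_eq_zero_iff.mp hl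
    | succ k =>
      simp only [combinationsA, List.mem_append, List.mem_map, ih]
      constructor
      · rintro (⟨d, ⟨hd, hl⟩, rfl⟩ | ⟨hs, hl⟩)
        · exact ⟨List.cons_sublist_cons.mpr hd, by simp [hl]⟩
        · exact ⟨hs.cons x, hl⟩
      · rintro ⟨hs, hl⟩
        rcases List.sublist_cons_iff.mp hs with h | ⟨r, rfl, hr⟩
        · exact Or.inr ⟨h, hl⟩
        · exact Or.inl ⟨r, ⟨hr, by simpa using hl⟩, rfl⟩

-- A's 'any over combinations of size k' is existence of a consistent k-subset
theorem hit_iff (statements : List (List Int)) (nums : List Int) (k : Nat) :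
    ((combinationsA nums k).any (fun c => checkA statements c)) = true ↔
    ∃ c, (c.Sublist nums ∧ c.length = k) ∧ checkA statements c = true := by
  simp only [List.any_eq_true, mem_combinationsA]

-- A's descending loop lands exactly on M
theorem goA_eq (statements : List (List Int)) (M : Int)
    (h0 : 0 ≤ M)
    (hub : ∀ c, c.Sublist (rlist statements.length) → checkA statements c = true → (c.length : Int) ≤ M)
    (hach : ∃ c, c.Sublist (rlist statements.length) ∧ checkA statements c = true ∧ (c.length : Int) = M) :
    ∀ (j : Nat), M ≤ (j : Int) →
      goA statements (rlist statements.length) (PySem.List.pyRange (j : Int) 0 (-1)) = M := by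
  intro j
  induction j with
  | zero =>
    intro hj
    rw [PySem.List.pyRange_neg_one_eq_nil (by simp)]
    simp only [goA]
    omega
  | succ j ih =>
    intro hj
    rw [PySem.List.pyRange_neg_one_cons (by push_cast; omega)]
    have hcast : ((j + 1 : Nat) : Int) - 1 = (j : Int) := by push_cast; ring
    rw [hcast]
    simp only [goA]
    by_cases hhit : ((combinationsA (rlist statements.length) ((j + 1 : Nat) : Int).toNat).any
        (fun c => checkA statements c)) = true
    · rw [if_pos hhit]
      rw [Int.toNat_natCast] at hhit
      rcases (hit_iff _ _ _).mp hhit with ⟨c, ⟨hsub, hlen⟩, hchk⟩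
      have := hub c hsub hchk
      rw [hlen] at this
      omega
    · rw [if_neg hhit]
      have hne : M ≠ ((j + 1 : Nat) : Int) := by
        intro heq
        rcases hach with ⟨c, hsub, hchk, hlen⟩
        apply hhit
        rw [Int.toNat_natCast]
        exact (hit_iff _ _ _).mpr ⟨c, ⟨hsub, by omega⟩, hchk⟩
      exact ih (by omega)

-- 'all' over set(sub) is 'all' over sub
theorem all_ofList (l : List Int) (p : Int → Bool) :
    (PySem.Set.ofList l).all p = l.all p := by
  rw [Bool.eq_iff_iff]
  simp only [List.all_eq_true]
  constructor
  · intro h x hx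
    exact h x ((PySem.Set.mem_ofList l x).mpr hx)
  · intro h x hx
    exact h x ((PySem.Set.mem_ofList l x).mp hx)

-- checkA as a plain proposition
theorem checkA_iff (statements : List (List Int)) (sub : List Int) :
    checkA statements sub = true ↔
    ∀ m ∈ sub, ∀ iv ∈ PySem.List.enumerate ((PySem.List.pyGet? statements m).getD []),
      (iv.2 = 1 → iv.1 ∈ sub) ∧ (iv.2 = 0 → iv.1 ∉ sub) := by
  have hmem : ∀ x : Int, PySem.Set.contains (PySem.Set.ofList sub) x = decide (x ∈ sub) := by
    intro x
    rw [Bool.eq_iff_iff]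
    simp [PySem.Set.mem_ofList]
  unfold checkA
  rw [all_ofList]
  simp only [List.all_eq_true, hmem, Bool.not_eq_true', Bool.or_eq_false_iff,
    Bool.and_eq_false_iff, decide_eq_true_eq, decide_eq_false_iff_not,
    Bool.not_eq_false']
  constructor
  · intro h m hm iv hiv
    have := h m hm iv hiv
    constructor
    · intro h1
      rcases this.2 with h2 | h2
      · exact absurd h1 (by simpa using h2)
      · simpa using h2
    · intro h0
      rcases this.1 with h2 | h2
      · exact absurd h0 (by simpa using h2)
      · simpa using h2
  · intro h m hm iv hiv
    have := h m hm iv hiv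
    constructor
    · by_cases h0 : iv.2 = 0
      · exact Or.inr (by simpa using this.2 h0)
      · exact Or.inl (by simpa using h0)
    · by_cases h1 : iv.2 = 1
      · exact Or.inr (by simpa using this.1 h1)
      · exact Or.inl (by simpa using h1)

-- ---- B side (bitmask folds) ----

-- the good/bad mask pair of one row
def rowPack (row : List Int) : Nat × Nat := (PySem.List.enumerate row).foldl packStep (0, 0)

def goodOf (statements : List (List Int)) : List Nat := statements.map (fun r => (rowPack r).1)
def badOf (statements : List (List Int)) : List Nat := statements.map (fun r => (rowPack r).2)

-- the set-bit positions of mask below n, and the same list as Ints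
def bits (n mask : Nat) : List Nat := (List.range n).filter (fun i => mask.testBit i)
def bitsOf (n mask : Nat) : List Int := (bits n mask).map (fun (k : Nat) => (k : Int))

-- the inner fold restricted to the set bits
def trip (good bad : List Nat) (s : Nat × Nat × Nat) (i : Nat) : Nat × Nat × Nat :=
  (s.1 ||| good.getD i 0, s.2.1 ||| bad.getD i 0, s.2.2 + 1)

theorem inner_eq_filter (mask n : Nat) (good bad : List Nat) (init : Nat × Nat × Nat) :
    (List.range n).foldl (innerStep mask good bad) init
      = (bits n mask).foldl (trip good bad) init := by
  rw [bits, List.foldl_filter]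
  have h : innerStep mask good bad = fun (x : Nat × Nat × Nat) (y : Nat) =>
      if mask.testBit y = true then trip good bad x y else x := by
    funext s i
    have hc : ((mask >>> i) &&& 1 == 1) = mask.testBit i := by
      simp [Nat.testBit, Nat.and_comm]
    simp only [innerStep, trip, hc]
  rw [h]

-- the count component is the length
theorem trip_cnt (good bad : List Nat) : ∀ (l : List Nat) (init : Nat × Nat × Nat),
    (l.foldl (trip good bad) init).2.2 = init.2.2 + l.length := by
  intro l
  induction l with
  | nil => simp
  | cons x t ih => intro init; simp [List.foldl_cons, ih, trip]; omega

-- bits of the OR-accumulated req / forb components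
theorem trip_req_testBit (good bad : List Nat) : ∀ (l : List Nat) (init : Nat × Nat × Nat) (j : Nat),
    (l.foldl (trip good bad) init).1.testBit j
      = (init.1.testBit j || l.any (fun i => (good.getD i 0).testBit j)) := by
  intro l
  induction l with
  | nil => simp
  | cons x t ih =>
    intro init j
    simp [List.foldl_cons, ih, trip, Nat.testBit_or, Bool.or_assoc]

theorem trip_forb_testBit (good bad : List Nat) : ∀ (l : List Nat) (init : Nat × Nat × Nat) (j : Nat),
    (l.foldl (trip good bad) init).2.1.testBit j
      = (init.2.1.testBit j || l.any (fun i => (bad.getD i 0).testBit j)) := by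
  intro l
  induction l with
  | nil => simp
  | cons x t ih =>
    intro init j
    simp [List.foldl_cons, ih, trip, Nat.testBit_or, Bool.or_assoc]

-- the packing fold, with a general start index and accumulator
theorem packFold_testBit : ∀ (row : List Int) (s : Nat) (p : Nat × Nat) (j : Nat),
    ((PySem.List.enumerate row (s : Int)).foldl packStep p).1.testBit j
      = (p.1.testBit j || decide (∃ k : Nat, ∃ _ : k < row.length, s + k = j ∧ row[k] = 1))
    ∧ ((PySem.List.enumerate row (s : Int)).foldl packStep p).2.testBit j
      = (p.2.testBit j || decide (∃ k : Nat, ∃ _ : k < row.length, s + k = j ∧ row[k] = 0)) := by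
  intro row
  induction row with
  | nil =>
    intro s p j
    simp [PySem.List.enumerate_nil]
  | cons x xs ih =>
    intro s p j
    rw [PySem.List.enumerate_cons]
    have hc : (s : Int) + 1 = ((s + 1 : Nat) : Int) := by push_cast; ring
    rw [List.foldl_cons, hc]
    rcases ih (s + 1) (packStep p ((s : Int), x)) j with ⟨ih1, ih2⟩
    have hsplit : ∀ (v : Int),
        (∃ k : Nat, ∃ _ : k < (x :: xs).length, s + k = j ∧ (x :: xs)[k] = v)
        ↔ ((s = j ∧ x = v) ∨ (∃ k : Nat, ∃ _ : k < xs.length, s + 1 + k = j ∧ xs[k] = v)) := by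
      intro v
      constructor
      · rintro ⟨k, hk, hj, hv⟩
        cases k with
        | zero => exact Or.inl ⟨by omega, by simpa using hv⟩
        | succ k' => exact Or.inr ⟨k', by simpa using hk, by omega, by simpa using hv⟩
      · rintro (⟨rfl, rfl⟩ | ⟨k, hk, hj, hv⟩)
        · exact ⟨0, by simp, by omega, by simp⟩
        · exact ⟨k + 1, by simpa using hk, by omega, by simpa using hv⟩
    constructor
    · rw [ih1]
      rw [Bool.eq_iff_iff]
      simp only [Bool.or_eq_true, decide_eq_true_eq, hsplit 1, packStep]
      by_cases h1 : x = 1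
      · simp [h1, Nat.testBit_or, Nat.one_shiftLeft, Nat.testBit_two_pow]
        all_goals tauto
      · by_cases h0 : x = 0 <;>
          simp [h1, h0] <;> tauto
    · rw [ih2]
      rw [Bool.eq_iff_iff]
      simp only [Bool.or_eq_true, decide_eq_true_eq, hsplit 0, packStep]
      by_cases h0 : x = 0
      · simp [h0, Nat.testBit_or, Nat.one_shiftLeft, Nat.testBit_two_pow]
        all_goals tauto
      · by_cases h1 : x = 1 <;>
          simp [h1, h0] <;> tauto

-- the packed masks of a row read back its 1/0 entries
theorem rowPack_testBit (row : List Int) (j : Nat) :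
    (rowPack row).1.testBit j = decide (∃ _ : j < row.length, row[j] = 1)
    ∧ (rowPack row).2.testBit j = decide (∃ _ : j < row.length, row[j] = 0) := by
  have h := packFold_testBit row 0 (0, 0) j
  have hz : ((0 : Nat) : Int) = (0 : Int) := rfl
  rw [hz] at h
  have hiff : ∀ (v : Int),
      (∃ k : Nat, ∃ _ : k < row.length, 0 + k = j ∧ row[k] = v) ↔ (∃ _ : j < row.length, row[j] = v) := by
    intro v
    constructor
    · rintro ⟨k, hk, hj, hv⟩
      have : k = j := by omega
      subst this
      exact ⟨hk, hv⟩
    · rintro ⟨hj, hv⟩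
      exact ⟨j, hj, by omega, hv⟩
  rcases h with ⟨h1, h2⟩
  unfold rowPack
  constructor
  · rw [h1]; simp
  · rw [h2]; simp

-- bitwise subset / disjointness as propositions
theorem and_eq_self_iff (a m : Nat) :
    a &&& m = a ↔ ∀ j, a.testBit j = true → m.testBit j = true := by
  constructor
  · intro h j hj
    have := congrArg (fun x => x.testBit j) h
    simp only [Nat.testBit_and] at this
    rw [hj] at this
    simpa using this
  · intro h
    apply Nat.eq_of_testBit_eq
    intro j
    rw [Nat.testBit_and]
    by_cases hj : a.testBit j
    · simp [hj, h j hj]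
    · simp [Bool.eq_false_iff.mpr hj]

theorem and_eq_zero_iff (a m : Nat) :
    a &&& m = 0 ↔ ∀ j, ¬(a.testBit j = true ∧ m.testBit j = true) := by
  constructor
  · intro h j ⟨ha, hm⟩
    have := congrArg (fun x => x.testBit j) h
    simp only [Nat.testBit_and, Nat.zero_testBit] at this
    rw [ha, hm] at this
    simp at this
  · intro h
    apply Nat.eq_of_testBit_eq
    intro j
    rw [Nat.testBit_and, Nat.zero_testBit]
    by_cases ha : a.testBit j
    · have := h j
      rw [Bool.eq_false_iff]
      intro hc
      exact this ⟨ha, (Bool.and_eq_true _ _).mp hc |>.2⟩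
    · simp [Bool.eq_false_iff.mpr ha]

-- membership in bitsOf, under mask < 2^n
theorem mem_bitsOf (n mask : Nat) (hm : mask < 2 ^ n) (i : Int) :
    i ∈ bitsOf n mask ↔ ∃ k : Nat, i = (k : Int) ∧ mask.testBit k = true := by
  simp only [bitsOf, bits, List.mem_map, List.mem_filter, List.mem_range]
  constructor
  · rintro ⟨k, ⟨hk, ht⟩, rfl⟩
    exact ⟨k, rfl, ht⟩
  · rintro ⟨k, rfl, ht⟩
    refine ⟨k, ⟨?_, ht⟩, rfl⟩
    by_contra hk
    have hlt : mask < 2 ^ k := lt_of_lt_of_le hm (Nat.pow_le_pow_right (by omega) (by omega))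
    rw [Nat.testBit_lt_two_pow hlt] at ht
    exact Bool.false_ne_true ht

def okM (statements : List (List Int)) (mask : Nat) : Bool :=
  let t := (bits statements.length mask).foldl (trip (goodOf statements) (badOf statements)) (0, 0, 0)
  (t.1 &&& mask == t.1) && (t.2.1 &&& mask == 0)

def cntM (statements : List (List Int)) (mask : Nat) : Int := ((bits statements.length mask).length : Int)

-- B's consistency test on a mask is A's check on the decoded subset
theorem okM_iff (statements : List (List Int)) (mask : Nat)
    (hm : mask < 2 ^ statements.length) :
    okM statements mask = checkA statements (bitsOf statements.length mask) := by
  have hbits_lt : ∀ k ∈ bits statements.length mask, k < statements.length :=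
    fun k hk => List.mem_range.mp (List.mem_filter.mp hk).1
  have hbits_bit : ∀ k ∈ bits statements.length mask, mask.testBit k = true :=
    fun k hk => (List.mem_filter.mp hk).2
  have hbit_mem : ∀ k : Nat, k < statements.length → mask.testBit k = true →
      k ∈ bits statements.length mask :=
    fun k h1 h2 => List.mem_filter.mpr ⟨List.mem_range.mpr h1, by simpa using h2⟩
  have hmem_int : ∀ p : Nat, ((p : Int) ∈ bitsOf statements.length mask) ↔ mask.testBit p = true := by
    intro p
    rw [mem_bitsOf _ _ hm]
    constructor
    · rintro ⟨k, hk, ht⟩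
      rwa [Nat.cast_inj.mp hk]
    · intro ht
      exact ⟨p, rfl, ht⟩
  have hgoodD : ∀ (k : Nat) (hk : k < statements.length),
      (goodOf statements).getD k 0 = (rowPack statements[k]).1 := by
    intro k hk
    simp [goodOf, List.getD_eq_getElem?_getD, List.getElem?_map, List.getElem?_eq_getElem hk]
  have hbadD : ∀ (k : Nat) (hk : k < statements.length),
      (badOf statements).getD k 0 = (rowPack statements[k]).2 := by
    intro k hk
    simp [badOf, List.getD_eq_getElem?_getD, List.getElem?_map, List.getElem?_eq_getElem hk]
  have hgetrow : ∀ (k : Nat) (hk : k < statements.length),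
      (PySem.List.pyGet? statements (k : Int)).getD [] = statements[k] := by
    intro k hk
    simp [List.getElem?_eq_getElem hk]
  rw [Bool.eq_iff_iff]
  unfold okM
  rw [Bool.and_eq_true, beq_iff_eq, beq_iff_eq, checkA_iff]
  rw [and_eq_self_iff, and_eq_zero_iff]
  simp only [trip_req_testBit, trip_forb_testBit, Nat.zero_testBit, Bool.false_or,
    List.any_eq_true]
  have h0p : ∀ p : Nat, (0 : Int) + (p : Nat) = (p : Int) := by intro p; push_cast; ring
  constructor
  · rintro ⟨h1, h2⟩ m hmm iv hiv
    simp only [bitsOf] at hmm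
    rcases List.mem_map.mp hmm with ⟨k, hkb, rfl⟩
    have hklt := hbits_lt k hkb
    rw [hgetrow k hklt] at hiv
    rcases (PySem.List.mem_enumerate_iff _ _ _).mp hiv with ⟨p, hp, rfl⟩
    constructor
    · intro h1v
      simp only [h0p]
      exact (hmem_int p).mpr (h1 p ⟨k, hkb, by
        rw [hgoodD k hklt, (rowPack_testBit _ _).1]
        exact decide_eq_true ⟨hp, h1v⟩⟩)
    · intro h0v hinmem
      simp only [h0p] at hinmem
      exact h2 p ⟨⟨k, hkb, by
        rw [hbadD k hklt, (rowPack_testBit _ _).2]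
        exact decide_eq_true ⟨hp, h0v⟩⟩, (hmem_int p).mp hinmem⟩
  · intro h
    constructor
    · intro j hj
      rcases hj with ⟨i, hib, hbit⟩
      have hilt := hbits_lt i hib
      rw [hgoodD i hilt, (rowPack_testBit _ _).1] at hbit
      rcases of_decide_eq_true hbit with ⟨hjlt, hval⟩
      have hmm : (i : Int) ∈ bitsOf statements.length mask := (hmem_int i).mpr (hbits_bit i hib)
      have hiv : ((0 : Int) + (j : Nat), statements[i][j]) ∈
          PySem.List.enumerate ((PySem.List.pyGet? statements (i : Int)).getD []) := by
        rw [hgetrow i hilt]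
        exact (PySem.List.mem_enumerate_iff _ _ _).mpr ⟨j, hjlt, rfl⟩
      have hres := (h (i : Int) hmm _ hiv).1 hval
      simp only [h0p] at hres
      exact (hmem_int j).mp hres
    · rintro j ⟨⟨i, hib, hbit⟩, hmbit⟩
      have hilt := hbits_lt i hib
      rw [hbadD i hilt, (rowPack_testBit _ _).2] at hbit
      rcases of_decide_eq_true hbit with ⟨hjlt, hval⟩
      have hmm : (i : Int) ∈ bitsOf statements.length mask := (hmem_int i).mpr (hbits_bit i hib)
      have hiv : ((0 : Int) + (j : Nat), statements[i][j]) ∈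
          PySem.List.enumerate ((PySem.List.pyGet? statements (i : Int)).getD []) := by
        rw [hgetrow i hilt]
        exact (PySem.List.mem_enumerate_iff _ _ _).mpr ⟨j, hjlt, rfl⟩
      apply (h (i : Int) hmm _ hiv).2 hval
      simp only [h0p]
      exact (hmem_int j).mpr hmbit

-- encoding a subset as a mask
def maskOfN (u : List Nat) : Nat := u.foldl (fun m k => m ||| (1 <<< k)) 0

theorem testBit_maskOfN : ∀ (u : List Nat) (init j : Nat),
    (u.foldl (fun m k => m ||| (1 <<< k)) init).testBit j
      = (init.testBit j || decide (j ∈ u)) := by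
  intro u
  induction u with
  | nil => simp
  | cons x t ih =>
    intro init j
    rw [List.foldl_cons, ih]
    simp [Nat.testBit_or, Nat.one_shiftLeft, Nat.testBit_two_pow, List.mem_cons,
      Bool.or_assoc, eq_comm]

theorem foldor_lt (n : Nat) : ∀ (u : List Nat) (init : Nat), init < 2 ^ n → (∀ k ∈ u, k < n) →
    u.foldl (fun m k => m ||| (1 <<< k)) init < 2 ^ n := by
  intro u
  induction u with
  | nil => intro init hi _; simpa using hi
  | cons x t ih =>
    intro init hi hk
    rw [List.foldl_cons]
    apply ih
    · apply Nat.or_lt_two_pow hi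
      rw [Nat.one_shiftLeft]
      exact Nat.pow_lt_pow_right (by omega) (hk x (List.mem_cons_self))
    · intro k hkm; exact hk k (List.mem_cons_of_mem _ hkm)

theorem maskOfN_lt (u : List Nat) (n : Nat) (h : ∀ k ∈ u, k < n) : maskOfN u < 2 ^ n :=
  foldor_lt n u 0 (Nat.two_pow_pos n) h

theorem filter_range_eq_self (c : List Nat) (n : Nat)
    (hs : c.Pairwise (· < ·)) (hlt : ∀ x ∈ c, x < n) :
    (List.range n).filter (fun i => decide (i ∈ c)) = c := by
  induction n generalizing c with
  | zero =>
    cases c with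
    | nil => simp
    | cons x t => exact absurd (hlt x List.mem_cons_self) (by omega)
  | succ n ih =>
    rw [List.range_succ, List.filter_append]
    by_cases hn : n ∈ c
    · rcases List.eq_nil_or_concat c with rfl | ⟨l', a, rfl⟩
      · simp at hn
      · simp only [List.concat_eq_append] at hs hlt hn ⊢
        have hpl : ∀ x ∈ l', x < a := by
          intro x hx
          have := List.pairwise_append.mp hs
          exact this.2.2 x hx a (List.mem_singleton_self a)
        have ha : a = n := by
          rcases List.mem_append.mp hn with h | h
          · have h1 := hpl n h
            have h2 := hlt a (List.mem_append_right _ (List.mem_singleton_self a))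
            omega
          · simpa using (List.mem_singleton.mp h).symm
        rw [ha] at hpl hs hn ⊢
        have hfilt : (List.range n).filter (fun i => decide (i ∈ l' ++ [n]))
            = (List.range n).filter (fun i => decide (i ∈ l')) := by
          apply List.filter_congr
          intro i hi
          have hin : i < n := List.mem_range.mp hi
          simp only [List.mem_append, List.mem_singleton, decide_eq_decide]
          constructor
          · rintro (h | rfl)
            · exact h
            · omega
          · exact Or.inl
        rw [hfilt, ih l' ((List.pairwise_append.mp hs).1) (fun x hx => hpl x hx)]
        simp
    · have hfl : (List.filter (fun i => decide (i ∈ c)) [n]) = [] := by simp [hn]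
      rw [hfl, List.append_nil]
      apply ih c hs
      intro x hx
      have := hlt x hx
      have : x ≠ n := fun h => hn (h ▸ hx)
      omega

theorem bits_maskOfN (u : List Nat) (n : Nat) (hs : u.Pairwise (· < ·)) (hlt : ∀ k ∈ u, k < n) :
    bits n (maskOfN u) = u := by
  unfold bits
  have h : ∀ i, (maskOfN u).testBit i = decide (i ∈ u) := by
    intro i
    unfold maskOfN
    rw [testBit_maskOfN]
    simp
  rw [List.filter_congr (fun i _ => h i)]
  exact filter_range_eq_self u n hs hlt

-- decoding a sublist of rlist n back
theorem decode_sublist (c : List Int) (n : Nat) (hc : c.Sublist (rlist n)) :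
    ∃ u : List Nat, u.Pairwise (· < ·) ∧ (∀ k ∈ u, k < n) ∧ c = u.map (fun (k : Nat) => (k : Int)) := by
  rcases List.sublist_map_iff.mp (by simpa [rlist] using hc) with ⟨u, hu, rfl⟩
  refine ⟨u, ?_, ?_, rfl⟩
  · exact (List.pairwise_lt_range).sublist hu
  · intro k hk; exact List.mem_range.mp (hu.subset hk)

-- ---- generic running-maximum fold ----

theorem fold_ge {α : Type} (ok : α → Bool) (v : α → Int) (l : List α) :
    ∀ (init : Int),
      init ≤ l.foldl (fun best x => if ok x && v x > best then v x else best) init := by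
  induction l with
  | nil => intro init; simp
  | cons s t ih =>
    intro init
    rw [List.foldl_cons]
    refine le_trans ?_ (ih _)
    by_cases h : (ok s && decide (v s > init)) = true
    · rw [if_pos h]
      have h2 := of_decide_eq_true ((Bool.and_eq_true _ _).mp h).2
      omega
    · rw [if_neg h]

theorem fold_ub {α : Type} (ok : α → Bool) (v : α → Int) (l : List α) :
    ∀ (init : Int) (x : α), x ∈ l → ok x = true →
      v x ≤ l.foldl (fun best x => if ok x && v x > best then v x else best) init := by
  induction l with
  | nil => intro _ _ h; exact absurd h (List.not_mem_nil)
  | cons s t ih =>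
    intro init x hmem hok
    rw [List.foldl_cons]
    rcases List.mem_cons.mp hmem with rfl | hmem'
    · refine le_trans ?_ (fold_ge ok v t _)
      by_cases h : (ok x && decide (v x > init)) = true
      · rw [if_pos h]
      · rw [if_neg h]
        rw [hok, Bool.true_and, decide_eq_true_eq] at h
        omega
    · exact ih _ x hmem' hok

theorem fold_mem {α : Type} (ok : α → Bool) (v : α → Int) (l : List α) :
    ∀ (init : Int),
      l.foldl (fun best x => if ok x && v x > best then v x else best) init = init ∨
      ∃ x ∈ l, ok x = true ∧ v x = l.foldl (fun best x => if ok x && v x > best then v x else best) init := by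
  induction l with
  | nil => intro init; exact Or.inl rfl
  | cons s t ih =>
    intro init
    rw [List.foldl_cons]
    by_cases hc : (ok s && decide (v s > init)) = true
    · rw [if_pos hc]
      rcases ih (v s) with h | ⟨x, hm, hok, heq⟩
      · exact Or.inr ⟨s, List.mem_cons_self, ((Bool.and_eq_true _ _).mp hc).1, h.symm⟩
      · exact Or.inr ⟨x, List.mem_cons_of_mem _ hm, hok, heq⟩
    · rw [if_neg hc]
      rcases ih init with h | ⟨x, hm, hok, heq⟩
      · exact Or.inl h
      · exact Or.inr ⟨x, List.mem_cons_of_mem _ hm, hok, heq⟩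

-- ---- B's port as a running-maximum fold over masks ----

-- B's pair-of-lists building fold is a pair of maps
theorem pair_append_fold {α : Type} (f g : α → Nat) : ∀ (l : List α) (a b : List Nat),
    l.foldl (fun (acc : List Nat × List Nat) row => (acc.1 ++ [f row], acc.2 ++ [g row])) (a, b)
      = (a ++ l.map f, b ++ l.map g) := by
  intro l
  induction l with
  | nil => simp
  | cons x t ih =>
    intro a b
    rw [List.foldl_cons, ih]
    simp

theorem alt_eq_fold (statements : List (List Int)) :
    maximumGood_alt statements = (List.range (2 ^ statements.length)).foldl
      (fun best mask => if okM statements mask && cntM statements mask > best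
        then cntM statements mask else best) 0 := by
  have hgb : statements.foldl
      (fun (acc : List Nat × List Nat) row =>
        let m := (PySem.List.enumerate row).foldl packStep (0, 0)
        (acc.1 ++ [m.1], acc.2 ++ [m.2])) ([], [])
      = (goodOf statements, badOf statements) := by
    have := pair_append_fold (fun r => (rowPack r).1) (fun r => (rowPack r).2) statements [] []
    simpa [goodOf, badOf, rowPack] using this
  have hbody : maskBody (goodOf statements) (badOf statements) statements.length
      = fun best mask => if okM statements mask && cntM statements mask > best
          then cntM statements mask else best := by
    funext best mask
    simp only [maskBody, okM, cntM, inner_eq_filter, trip_cnt, Nat.zero_add, Bool.and_assoc]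
    try rfl
  simp only [maximumGood_alt, hgb, Nat.one_shiftLeft, Nat.one_mul, hbody]

-- ===== VERDICT (by name: the statement is the Claim_ definition above) =====
theorem maximumGood_spec : Claim_equal_maximumGood := by
  intro statements _
  unfold Spec_maximumGood
  set n := statements.length with hn
  set M := maximumGood_alt statements with hMdef
  have hM : M = (List.range (2 ^ n)).foldl
      (fun best mask => if okM statements mask && cntM statements mask > best
        then cntM statements mask else best) 0 := alt_eq_fold statements
  have h0 : 0 ≤ M := hM ▸ fold_ge _ _ _ 0
  have hub : ∀ c, c.Sublist (rlist n) → checkA statements c = true → (c.length : Int) ≤ M := by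
    intro c hc hchk
    rcases decode_sublist c n hc with ⟨u, hsort, hlt, rfl⟩
    have hmlt : maskOfN u < 2 ^ n := maskOfN_lt u n hlt
    have hbits : bits n (maskOfN u) = u := bits_maskOfN u n hsort hlt
    have hdec : bitsOf n (maskOfN u) = u.map (fun (k : Nat) => (k : Int)) := by
      rw [bitsOf, hbits]
    have hok : okM statements (maskOfN u) = true := by
      rw [okM_iff statements (maskOfN u) hmlt, ← hn, hdec]
      exact hchk
    have hcnt : cntM statements (maskOfN u) = ((u.map (fun (k : Nat) => (k : Int))).length : Int) := by
      simp [cntM, ← hn, hbits]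
    rw [hM, ← hcnt]
    exact fold_ub _ _ _ 0 (maskOfN u) (List.mem_range.mpr hmlt) hok
  have hach : ∃ c, c.Sublist (rlist n) ∧ checkA statements c = true ∧ (c.length : Int) = M := by
    rcases fold_mem (okM statements) (cntM statements) (List.range (2 ^ n)) 0 with h | ⟨mask, hmr, hok, heq⟩
    · refine ⟨[], List.nil_sublist _, ?_, by rw [hM, h]; rfl⟩
      rw [checkA_iff]
      intro m hm
      exact absurd hm (List.not_mem_nil)
    · have hmlt : mask < 2 ^ n := List.mem_range.mp hmr
      refine ⟨bitsOf n mask, ?_, ?_, ?_⟩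
      · show ((bits n mask).map (fun (k : Nat) => (k : Int))).Sublist
            ((List.range n).map (fun (k : Nat) => (k : Int)))
        exact List.Sublist.map _ List.filter_sublist
      · have hmlt' : mask < 2 ^ statements.length := by rw [← hn]; exact hmlt
        have hiff := okM_iff statements mask hmlt'
        rw [hn, ← hiff]
        exact hok
      · rw [hM, ← heq]
        simp [bitsOf, cntM, ← hn]
  have hMn : M ≤ (n : Int) := by
    rcases hach with ⟨c, hsub, -, hlen⟩
    have h1 := hsub.length_le
    have h2 : (rlist n).length = n := by simp [rlist]
    omega
  have hr : PySem.List.pyRange 0 (n : Int) 1 = rlist n := by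
    rw [PySem.List.pyRange_zero_nat]; rfl
  have hgoal := goA_eq statements M h0 hub hach (n + 1) (by push_cast; omega)
  simp only [maximumGood]
  rw [hr]
  have hcast : ((n : Int) + 1) = ((n + 1 : Nat) : Int) := by push_cast; ring
  rw [hcast]
  exact hgoal
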